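-- pv_equiv track=rewrite | github.com/ShivamKumar-123/EccomerceWebsite-G- | backend/products/services/product_service.py | normalize_product_images
-- ===== SOURCE A (Python) =====
-- def normalize_product_images(raw) -> list:
--     """Non-empty unique image URLs, max 24, each max 500 chars."""
--     if not raw:
--         return []
--     if isinstance(raw, str):
--         raw = [raw]
--     if not isinstance(raw, list):
--         return []
--     out = []
--     seen = set()
--     for x in raw:
--         u = str(x).strip()[:500]
--         if not u or u in seen:
--             continue
--         seen.add(u)
--         out.append(u)
--         if len(out) >= 24:
--             break
--     return out
-- ===== SOURCE B (Python) =====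
-- def normalize_product_images(raw) -> list:
--     """Non-empty unique image URLs, max 24, each max 500 chars."""
--     if not raw:
--         return []
--     if isinstance(raw, str):
--         raw = [raw]
--     if not isinstance(raw, list):
--         return []
--     cleaned = [u for u in (str(x).strip()[:500] for x in raw) if u]
--
--     def nub(items, k):
--         # classic filter-the-remainder dedup: keep the head, delete all its
--         # later occurrences, recurse; k caps the result length
--         if not items or k == 0:
--             return []
--         u, rest = items[0], items[1:]
--         return [u] + nub([v for v in rest if v != u], k - 1)
--
--     return nub(cleaned, 24)
-- ===== Notes on version B (the rewrite author's own statement) =====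
-- stated objective: alternative
-- what changed: Replaces the seen-set/early-break accumulator loop with a cleaning pass followed by a recursive filter-the-remainder dedup (no membership structure at all: each kept head is erased from the rest of the list before recursing, with the 24-cap threaded through the recursion).
import Mathlib
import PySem

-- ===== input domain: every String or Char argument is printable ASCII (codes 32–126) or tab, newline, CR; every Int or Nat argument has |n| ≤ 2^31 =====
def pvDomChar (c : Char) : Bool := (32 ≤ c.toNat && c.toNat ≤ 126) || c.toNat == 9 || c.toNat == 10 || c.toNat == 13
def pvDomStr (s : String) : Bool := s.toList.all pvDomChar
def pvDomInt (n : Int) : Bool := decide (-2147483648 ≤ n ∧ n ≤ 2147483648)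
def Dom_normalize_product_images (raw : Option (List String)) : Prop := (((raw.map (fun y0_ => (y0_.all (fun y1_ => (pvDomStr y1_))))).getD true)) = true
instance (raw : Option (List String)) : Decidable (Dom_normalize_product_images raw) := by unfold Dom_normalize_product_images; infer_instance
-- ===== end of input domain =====

-- ===== PORT A =====
-- B is an alternative decomposition: a cleaning pass followed by a recursive
-- filter-the-remainder dedup (no membership structure), cap threaded through the
-- recursion; same results, no speed claim (B is quadratic).
-- Under the typed signature Option (List String), A's `isinstance` guards
-- (str-wrap, non-list) are vacuous; `not raw` is none or the empty list.
-- str(x).strip()[:500]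
def pvClean (x : String) : String :=
  PySem.Str.slice (PySem.Str.strip x) none (some 500)

-- A's for-loop: out/seen accumulators, `continue` on empty or seen, break at len(out) >= 24
def pvLoopA : List String → PySem.Set String → List String → List String
  | [], _, out => out
  | x :: rest, seen, out =>
    let u := pvClean x
    if u = "" ∨ PySem.Set.contains seen u then
      pvLoopA rest seen out
    else
      let out' := out ++ [u]
      if 24 ≤ out'.length then out' else pvLoopA rest (PySem.Set.add seen u) out'

def normalize_product_images (raw : Option (List String)) : List String :=
  match raw with
  | none => []
  | some l => if l = [] then [] else pvLoopA l PySem.Set.empty []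

-- ===== PORT B =====
-- cleaned = [u for u in (str(x).strip()[:500] for x in raw) if u]
def pvCleaned (l : List String) : List String :=
  l.filterMap (fun x => let u := pvClean x; if u = "" then none else some u)

-- def nub(items, k): keep head, delete its later occurrences, recurse; k caps length
def pvNub : List String → Nat → List String
  | [], _ => []
  | _ :: _, 0 => []
  | u :: rest, k + 1 => u :: pvNub (rest.filter (fun v => v ≠ u)) k

def normalize_product_images_alt (raw : Option (List String)) : List String :=
  match raw with
  | none => []
  | some l => if l = [] then [] else pvNub (pvCleaned l) 24

-- ===== PRECONDITION & SPEC =====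
def Spec_normalize_product_images (raw : Option (List String)) (out : List String) : Prop := out = normalize_product_images_alt raw
instance (raw : Option (List String)) (out : List String) : Decidable (Spec_normalize_product_images raw out) := by unfold Spec_normalize_product_images; infer_instance

-- ===== CLAIM (what is proved, stated in full; the proofs are below) =====
def Claim_equal_normalize_product_images : Prop := ∀ (raw : Option (List String)), Dom_normalize_product_images raw → Spec_normalize_product_images raw (normalize_product_images raw)

-- ===== LEMMAS AND PROOFS =====
-- A's deduplicating pass, without the output accumulator or the break
def pvDedupFrom : PySem.Set String → List String → List String
  | _, [] => []
  | seen, x :: rest =>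
    let u := pvClean x
    if u = "" ∨ PySem.Set.contains seen u then pvDedupFrom seen rest
    else u :: pvDedupFrom (PySem.Set.add seen u) rest

lemma pvLoopA_eq (xs : List String) : ∀ (seen : PySem.Set String) (out : List String),
    out.length < 24 →
    pvLoopA xs seen out = out ++ (pvDedupFrom seen xs).take (24 - out.length) := by
  induction xs with
  | nil => intro seen out h; simp [pvLoopA, pvDedupFrom]
  | cons x rest ih =>
    intro seen out h
    simp only [pvLoopA, pvDedupFrom]
    split
    · exact ih seen out h
    · simp only [List.take_succ_cons, show 24 - out.length = (24 - (out.length + 1)) + 1 by omega]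
      by_cases h24 : 24 ≤ (out ++ [pvClean x]).length
      · simp only [if_pos h24]
        have : 24 - (out.length + 1) = 0 := by simp at h24; omega
        simp [this]
      · simp only [if_neg h24]
        rw [ih _ _ (by simp at h24 ⊢; omega)]
        simp

-- capped prefix of A's dedup pass = B's nub of the not-yet-seen cleaned elements
set_option maxHeartbeats 1000000 in
lemma pvDedupFrom_take_eq (xs : List String) : ∀ (seen : PySem.Set String) (k : Nat),
    (pvDedupFrom seen xs).take k
      = pvNub ((pvCleaned xs).filter (fun u => ! PySem.Set.contains seen u)) k := by
  induction xs with
  | nil => intro seen k; simp [pvCleaned, pvDedupFrom, pvNub]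
  | cons x rest ih =>
    intro seen k
    by_cases hu : pvClean x = ""
    · simp only [pvCleaned, List.filterMap_cons, if_pos hu, pvDedupFrom, if_pos (Or.inl hu)]
      exact ih seen k
    · by_cases hs : PySem.Set.contains seen (pvClean x) = true
      · have hmem : pvClean x ∈ seen := List.mem_of_elem_eq_true hs
        simp only [pvCleaned, List.filterMap_cons, if_neg hu]
        rw [List.filter_cons_of_neg (by simp [hmem])]
        simp only [pvDedupFrom]
        rw [if_pos (Or.inr hs)]
        exact ih seen k
      · have hmem : pvClean x ∉ seen := fun h => hs (List.elem_eq_true_of_mem h)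
        simp only [pvCleaned, List.filterMap_cons, if_neg hu]
        rw [List.filter_cons_of_pos (by simp [hmem])]
        simp only [pvDedupFrom]
        rw [if_neg (by simp [hu, hmem])]
        cases k with
        | zero => simp [pvNub]
        | succ k =>
          simp only [List.take_succ_cons, pvNub, List.cons.injEq, true_and]
          rw [ih (PySem.Set.add seen (pvClean x)) k]
          have harg : List.filter (fun u => !PySem.Set.contains (PySem.Set.add seen (pvClean x)) u) (pvCleaned rest)
              = List.filter (fun v => decide (v ≠ pvClean x))
                  (List.filter (fun u => !PySem.Set.contains seen u) (pvCleaned rest)) := by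
            rw [List.filter_filter]
            apply List.filter_congr
            intro v _
            have hadd : PySem.Set.add seen (pvClean x) = seen ++ [pvClean x] := by
              simp [PySem.Set.add, hmem]
            rw [hadd]
            by_cases hv : v ∈ seen <;> by_cases hvx : v = pvClean x <;> simp [hv, hvx]
          exact congrArg (fun l => pvNub l k) harg

-- ===== VERDICT (by name: the statement is the Claim_ definition above) =====
theorem normalize_product_images_spec : Claim_equal_normalize_product_images := by
  intro raw _
  unfold Spec_normalize_product_images normalize_product_images normalize_product_images_alt
  match raw with
  | none => rfl
  | some l =>
    by_cases hl : l = []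
    · simp [hl]
    · simp only [if_neg hl]
      rw [pvLoopA_eq l PySem.Set.empty [] (by simp), pvDedupFrom_take_eq]
      simp [PySem.Set.empty]
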